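-- pv_equiv track=rewrite | github.com/cli3338198/leetcode | 2553-separate-the-digits-in-an-array/2553-separate-the-digits-in-an-array.py | separateDigits
-- ===== SOURCE A (Python) =====
-- from typing import List
--
-- def separateDigits(nums: List[int]) -> List[int]:
--     def separate(num: int) -> List[int]:
--         res = []
--         while num != 0:
--             res.append(num % 10)
--             num //= 10
--         return res[::-1]
--
--     res = []
--     for num in nums:
--         res += separate(num)
--     return res
-- ===== SOURCE B (Python) =====
-- from typing import List
--
-- def separateDigits(nums: List[int]) -> List[int]:
--     # One comprehension: digits most-significant-first via string conversion.
--     # Note: for 0 this yields [0] (its digit), where A yields [].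
--     return [int(c) for num in nums for c in str(num)]
-- ===== Notes on version B (the rewrite author's own statement) =====
-- stated objective: idiomatic
-- what changed: Replaces the while-loop modular digit extraction plus list reversal with a single comprehension converting each number to its decimal string and mapping characters back to ints, most-significant digit first.
-- intended difference: On lists containing 0 (with all elements non-negative), A silently drops each 0 because its extraction loop body never runs for 0, while B emits the digit 0; 0's decimal digit is 0, so B's value is the intended one. — e.g. on separateDigits([10, 0, 3]): A returns [1, 0, 3], B returns [1, 0, 0, 3]
import Mathlib
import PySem

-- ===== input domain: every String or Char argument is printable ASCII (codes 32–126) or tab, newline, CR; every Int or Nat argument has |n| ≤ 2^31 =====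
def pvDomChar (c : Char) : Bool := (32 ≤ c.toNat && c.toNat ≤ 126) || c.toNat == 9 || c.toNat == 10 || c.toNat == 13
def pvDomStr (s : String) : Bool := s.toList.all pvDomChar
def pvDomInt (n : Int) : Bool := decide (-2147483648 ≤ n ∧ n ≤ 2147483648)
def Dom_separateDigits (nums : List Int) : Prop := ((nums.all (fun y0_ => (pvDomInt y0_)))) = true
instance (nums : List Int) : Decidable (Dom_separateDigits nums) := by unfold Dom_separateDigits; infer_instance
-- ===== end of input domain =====

-- B replaces A's while-loop modular digit extraction + reversal with a string-conversion
-- comprehension (idiomatic); on lists containing 0 A drops the 0 while B emits it (see D_).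


-- ===== PORT A =====
-- the 'while num != 0' loop of separate(); the '0 < num' guard is a totality guard only:
-- for num < 0 the Python loop never terminates (excluded by Pre_ below), and for num ≥ 0
-- the guard coincides with Python's 'num != 0'.
def sepWhile (num : Int) (res : List Int) : List Int :=
  if _h : 0 < num then
    sepWhile (PySem.Int.floordiv num 10) (res ++ [PySem.Int.mod num 10])
  else res
termination_by num.toNat
decreasing_by
  rw [PySem.Int.floordiv_eq_ediv_of_pos (by omega)]
  omega

-- separate(num): run the loop from an empty accumulator, then reverse via res[::-1]
def sepA (num : Int) : List Int :=
  (PySem.List.slice? (sepWhile num []) none none (-1)).getD []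

def separateDigits (nums : List Int) : List Int :=
  nums.foldl (fun res num => res ++ sepA num) []

-- ===== PORT B =====
-- [int(c) for num in nums for c in str(num)]; int(c) on the digit characters produced by
-- str(num) for num ≥ 0 is exactly (c.toNat : Int) - 48 (exact on that domain; Pre_ below
-- restricts to num ≥ 0).
def separateDigits_alt (nums : List Int) : List Int :=
  nums.flatMap (fun num => (PySem.Int.toChars num).map (fun c => ((c.toNat : Int) - 48)))

-- ===== PRECONDITION & SPEC =====
-- Pre_ excludes lists with a negative element: there A's extraction loop never terminates
-- (in Python -1 // 10 = -1), so A returns on no such input.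
def Pre_separateDigits (nums : List Int) : Prop := ∀ n ∈ nums, 0 ≤ n
instance (nums : List Int) : Decidable (Pre_separateDigits nums) := by unfold Pre_separateDigits; infer_instance
def pvWitness_separateDigits : List Int := [123, 45, 7]

-- On lists containing 0 (all elements non-negative), A silently drops each 0 (its loop body
-- never runs, contributing no digits) while B emits the digit 0, which is 0's decimal digit and
-- the intended value.
def D_separateDigits (nums : List Int) : Prop := 0 ∈ nums
instance (nums : List Int) : Decidable (D_separateDigits nums) := by unfold D_separateDigits; infer_instance
def Spec_separateDigits (nums : List Int) (out : List Int) : Prop := ¬ D_separateDigits nums → out = separateDigits_alt nums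
instance (nums : List Int) (out : List Int) : Decidable (Spec_separateDigits nums out) := by unfold Spec_separateDigits; infer_instance
def pvDiffWitness_separateDigits : List Int := [10, 0, 3]
def pvDiffWitnessOut_separateDigits : (List Int) × (List Int) := ([1, 0, 3], [1, 0, 0, 3])

-- ===== CLAIM (what is proved, stated in full; the proofs are below) =====
def Claim_unchanged_separateDigits : Prop := ∀ (nums : List Int), Dom_separateDigits nums → Pre_separateDigits nums → Spec_separateDigits nums (separateDigits nums)
def Claim_changed_separateDigits : Prop := Dom_separateDigits (pvDiffWitness_separateDigits) ∧ Pre_separateDigits (pvDiffWitness_separateDigits) ∧ D_separateDigits (pvDiffWitness_separateDigits) ∧ separateDigits (pvDiffWitness_separateDigits) = pvDiffWitnessOut_separateDigits.1 ∧ separateDigits_alt (pvDiffWitness_separateDigits) = pvDiffWitnessOut_separateDigits.2 ∧ pvDiffWitnessOut_separateDigits.1 ≠ pvDiffWitnessOut_separateDigits.2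
def Claim_exact_separateDigits : Prop := ∀ (nums : List Int), Dom_separateDigits nums → Pre_separateDigits nums → D_separateDigits nums → separateDigits nums ≠ separateDigits_alt nums

-- ===== LEMMAS AND PROOFS =====

-- A's loop accumulates the base-10 digits of num, least significant first.
lemma sepWhile_eq (num : Int) (res : List Int) (h : 0 ≤ num) :
    sepWhile num res = res ++ (Nat.digits 10 num.toNat).map (Int.ofNat) := by
  fun_induction sepWhile num res with
  | case1 num res hpos ih =>
    have hmod : PySem.Int.mod num 10 = ((num.toNat % 10 : Nat) : Int) := by
      conv_lhs => rw [← Int.toNat_of_nonneg h]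
      exact_mod_cast PySem.Int.mod_natCast num.toNat 10
    have hdiv : PySem.Int.floordiv num 10 = ((num.toNat / 10 : Nat) : Int) := by
      conv_lhs => rw [← Int.toNat_of_nonneg h]
      exact_mod_cast PySem.Int.floordiv_natCast num.toNat 10
    rw [ih (by rw [hdiv]; positivity)]
    rw [Nat.digits_def' (by norm_num : 1 < 10) (by omega : 0 < num.toNat), hmod, hdiv]
    simp
    have hx : (max num 0 / 10).toNat = num.toNat / 10 := by omega
    rw [hx]
  | case2 num res hpos =>
    have : num.toNat = 0 := by omega
    simp [this]

lemma sepA_eq (num : Int) (h : 0 ≤ num) :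
    sepA num = ((Nat.digits 10 num.toNat).map (Int.ofNat)).reverse := by
  rw [sepA, PySem.List.slice?_none_none_neg_one, Option.getD_some, sepWhile_eq num [] h,
    List.nil_append]

-- Nat.toDigits agrees with Nat.digits (reversed, rendered through digitChar) on positives.
lemma toDigitsCore_eq_digits (fuel : Nat) : ∀ (m : Nat), 0 < m → m < fuel → ∀ ds,
    Nat.toDigitsCore 10 fuel m ds = ((Nat.digits 10 m).map Nat.digitChar).reverse ++ ds := by
  induction fuel with
  | zero => omega
  | succ fuel ih =>
    intro m hm hlt ds
    rw [Nat.toDigitsCore]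
    by_cases hz : m / 10 = 0
    · rw [if_pos hz, Nat.digits_def' (by norm_num : 1 < 10) hm, hz]
      simp
    · rw [if_neg hz, ih (m / 10) (by omega) (by have := Nat.div_lt_self hm (by norm_num : 1 < 10); omega) _]
      rw [Nat.digits_def' (by norm_num : 1 < 10) hm]
      simp

lemma toDigits_eq_digits (m : Nat) (hm : 0 < m) :
    Nat.toDigits 10 m = ((Nat.digits 10 m).map Nat.digitChar).reverse := by
  rw [Nat.toDigits, toDigitsCore_eq_digits (m + 1) m hm (by omega), List.append_nil]

lemma digitChar_val (d : Nat) (hd : d < 10) :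
    ((Nat.digitChar d).toNat : Int) - 48 = Int.ofNat d := by
  interval_cases d <;> decide

-- B's per-element value, for positive num, is the same digit list.
lemma alt_elem_eq (num : Int) (h : 0 < num) :
    (PySem.Int.toChars num).map (fun c => ((c.toNat : Int) - 48))
      = ((Nat.digits 10 num.toNat).map (Int.ofNat)).reverse := by
  rw [PySem.Int.toChars, if_neg (by omega), toDigits_eq_digits num.toNat (by omega)]
  rw [List.map_reverse, List.map_map]
  congr 1
  exact List.map_congr_left (fun d hd =>
    digitChar_val d (Nat.digits_lt_base (by norm_num) hd))

lemma separateDigits_eq_flatMap (nums : List Int) :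
    separateDigits nums = nums.flatMap sepA := by
  rw [separateDigits, PySem.List.foldl_append_eq_flatMap, List.nil_append]

-- element lengths: equal for positive elements, strictly smaller on A's side for 0
lemma sepA_length_le (n : Int) (h : 0 ≤ n) :
    (sepA n).length ≤ ((PySem.Int.toChars n).map (fun c => ((c.toNat : Int) - 48))).length := by
  rcases eq_or_lt_of_le h with h0 | hpos
  · rw [sepA_eq n h, ← h0]
    decide
  · rw [sepA_eq n h, alt_elem_eq n hpos]

lemma flatMap_length_le : ∀ (nums : List Int), (∀ n ∈ nums, 0 ≤ n) →
    (nums.flatMap sepA).length ≤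
      (nums.flatMap (fun num => (PySem.Int.toChars num).map (fun c => ((c.toNat : Int) - 48)))).length := by
  intro nums hpre
  induction nums with
  | nil => simp
  | cons m r ihr =>
    simp only [List.flatMap_cons, List.length_append]
    have h1 := sepA_length_le m (hpre m (List.mem_cons_self))
    have h2 := ihr (fun x hx => hpre x (List.mem_cons_of_mem _ hx))
    omega

lemma length_lt_of_mem_zero : ∀ (nums : List Int), (∀ n ∈ nums, 0 ≤ n) → 0 ∈ nums →
    (separateDigits nums).length < (separateDigits_alt nums).length := by
  intro nums hpre hz
  rw [separateDigits_eq_flatMap, separateDigits_alt]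
  induction nums with
  | nil => simp at hz
  | cons n rest ih =>
    simp only [List.flatMap_cons, List.length_append]
    rcases List.mem_cons.mp hz with h0 | h0
    · have h1 : (sepA n).length < ((PySem.Int.toChars n).map (fun c => ((c.toNat : Int) - 48))).length := by
        rw [← h0, sepA_eq 0 le_rfl]
        decide
      have h2 := flatMap_length_le rest (fun x hx => hpre x (List.mem_cons_of_mem _ hx))
      omega
    · have h1 := sepA_length_le n (hpre n (List.mem_cons_self))
      have h2 := ih (fun x hx => hpre x (List.mem_cons_of_mem _ hx)) h0
      omega

-- ===== VERDICT (by name: the statement is the Claim_ definition above) =====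
theorem separateDigits_spec : Claim_unchanged_separateDigits := by
  intro nums _ hpre hD
  rw [separateDigits_eq_flatMap, separateDigits_alt]
  refine List.flatMap_congr (fun n hn => ?_)
  have h0 : 0 ≤ n := hpre n hn
  have hne : n ≠ 0 := fun h => hD (show (0:Int) ∈ nums from h ▸ hn)
  rw [sepA_eq n h0, alt_elem_eq n (by omega)]

theorem separateDigits_changed : Claim_changed_separateDigits := by
  unfold Claim_changed_separateDigits
  refine ⟨by decide, by decide, by decide, ?_, by decide, by decide⟩
  rw [show pvDiffWitness_separateDigits = [10, 0, 3] from rfl, separateDigits_eq_flatMap]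
  simp only [List.flatMap_cons, List.flatMap_nil]
  rw [sepA_eq 10 (by norm_num), sepA_eq 0 le_rfl, sepA_eq 3 (by norm_num)]
  decide

theorem separateDigits_tight : Claim_exact_separateDigits := by
  intro nums _ hpre hD heq
  exact absurd (congrArg List.length heq) (Nat.ne_of_lt (length_lt_of_mem_zero nums hpre hD))
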